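-- pv_equiv track=rewrite | github.com/DojunPark/IMS-Dependency_Parsing | utils.py | construct_word_vocab_dict
-- ===== SOURCE A (Python) =====
-- def construct_word_vocab_dict(sents):
--     word_vocab = {'[PAD]': 0, '[UNK]': 1}
--     pos_vocab = {'[PAD]': 0}
--
--     for sent in sents:
--         for word, pos, _ in sent:
--             word_vocab.setdefault(word, len(word_vocab))
--             pos_vocab.setdefault(pos, len(pos_vocab))
--     return word_vocab, pos_vocab
-- ===== SOURCE B (Python) =====
-- def construct_word_vocab_dict(sents):
--     # flatten once, dedup each column, then compute every id arithmetically
--     # from its position (enumerate with a start offset) instead of reading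
--     # the growing dict's length at each insertion.
--     tokens = [tok for sent in sents for tok in sent]
--     words = list(dict.fromkeys(w for w, _, _ in tokens))
--     tags = list(dict.fromkeys(p for _, p, _ in tokens))
--     word_vocab = {'[PAD]': 0, '[UNK]': 1}
--     word_vocab.update(
--         (w, i) for i, w in enumerate(
--             (w for w in words if w not in ('[PAD]', '[UNK]')), start=2))
--     pos_vocab = {'[PAD]': 0}
--     pos_vocab.update(
--         (p, i) for i, p in enumerate(
--             (p for p in tags if p != '[PAD]'), start=1))
--     return word_vocab, pos_vocab
-- ===== Notes on version B (the rewrite author's own statement) =====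
-- stated objective: alternative
-- what changed: A interleaves setdefault calls that read the growing dict's len to mint each id; B never keeps an index counter: it flattens once, dedups each column with dict.fromkeys, filters out the reserved keys, and computes all ids arithmetically with enumerate(start=offset) before bulk-updating the reserved dict.
import Mathlib
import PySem

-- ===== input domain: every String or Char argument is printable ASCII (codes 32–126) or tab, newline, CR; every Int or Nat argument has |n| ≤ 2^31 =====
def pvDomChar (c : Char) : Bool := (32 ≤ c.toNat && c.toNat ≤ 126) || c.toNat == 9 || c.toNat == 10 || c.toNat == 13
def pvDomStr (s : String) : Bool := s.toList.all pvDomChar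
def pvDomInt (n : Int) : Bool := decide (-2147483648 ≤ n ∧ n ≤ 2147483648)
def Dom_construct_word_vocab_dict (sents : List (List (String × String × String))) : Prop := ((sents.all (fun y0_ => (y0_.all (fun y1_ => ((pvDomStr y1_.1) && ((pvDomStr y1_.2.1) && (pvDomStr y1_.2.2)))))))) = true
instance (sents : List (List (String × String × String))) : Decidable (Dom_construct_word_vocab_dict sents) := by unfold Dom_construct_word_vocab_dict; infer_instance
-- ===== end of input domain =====

-- B replaces A's len-reading setdefault loop by: flatten once, dedup each column,
-- filter out the reserved keys, and compute every id arithmetically via enumerate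
-- with a start offset, bulk-merged into the reserved dict (same values, no counter).

-- ===== PORT A =====
def construct_word_vocab_dict (sents : List (List (String × String × String))) : (List (String × Int)) × (List (String × Int)) :=
  let st := sents.foldl
    (fun st sent => sent.foldl
      (fun st t =>
        (PySem.Dict.setdefault st.1 t.1 (st.1.size : Int),
         PySem.Dict.setdefault st.2 t.2.1 (st.2.size : Int))) st)
    (PySem.Dict.ofList [("[PAD]", 0), ("[UNK]", 1)], PySem.Dict.ofList [("[PAD]", 0)])
  (st.1.items, st.2.items)

-- ===== PORT B =====
def construct_word_vocab_dict_alt (sents : List (List (String × String × String))) : (List (String × Int)) × (List (String × Int)) :=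
  let tokens := sents.flatMap (fun sent => sent)
  let words := PySem.List.dedup (tokens.map (fun t => t.1))
  let tags := PySem.List.dedup (tokens.map (fun t => t.2.1))
  let wnew := (PySem.List.enumerate (words.filter (fun w => w != "[PAD]" && w != "[UNK]")) 2).map (fun p => (p.2, p.1))
  let pnew := (PySem.List.enumerate (tags.filter (fun p => p != "[PAD]")) 1).map (fun p => (p.2, p.1))
  (((PySem.Dict.ofList [("[PAD]", 0), ("[UNK]", 1)]).update wnew).items,
   ((PySem.Dict.ofList [("[PAD]", 0)]).update pnew).items)

-- ===== PRECONDITION & SPEC =====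
def Spec_construct_word_vocab_dict (sents : List (List (String × String × String))) (out : (List (String × Int)) × (List (String × Int))) : Prop := out = construct_word_vocab_dict_alt sents
instance (sents : List (List (String × String × String))) (out : (List (String × Int)) × (List (String × Int))) : Decidable (Spec_construct_word_vocab_dict sents out) := by unfold Spec_construct_word_vocab_dict; infer_instance

-- ===== CLAIM (what is proved, stated in full; the proofs are below) =====
def Claim_equal_construct_word_vocab_dict : Prop := ∀ (sents : List (List (String × String × String))), Dom_construct_word_vocab_dict sents → Spec_construct_word_vocab_dict sents (construct_word_vocab_dict sents)

-- ===== LEMMAS AND PROOFS =====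

-- A's update step on one vocabulary: add key with index = current size, if absent
def pvStep (d : PySem.Dict String Int) (k : String) : PySem.Dict String Int :=
  PySem.Dict.setdefault d k (d.size : Int)

lemma pvStep_of_contains (d : PySem.Dict String Int) (k : String) (h : d.contains k = true) :
    pvStep d k = d := by simp [pvStep, PySem.Dict.setdefault_of_contains (h := h)]

lemma contains_pvStep_self (d : PySem.Dict String Int) (k : String) :
    (pvStep d k).contains k = true := by
  by_cases h : d.contains k = true
  · simp [pvStep_of_contains d k h, h]
  · have h' : d.contains k = false := by simpa using h
    simp [pvStep, PySem.Dict.setdefault_of_not_contains (h := h')]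

lemma contains_pvStep_mono (d : PySem.Dict String Int) (k k' : String)
    (h : d.contains k = true) : (pvStep d k').contains k = true := by
  by_cases hc : d.contains k' = true
  · simp [pvStep_of_contains d k' hc, h]
  · have h' : d.contains k' = false := by simpa using hc
    simp [pvStep, PySem.Dict.setdefault_of_not_contains (h := h'), PySem.Dict.contains_insert, h]

lemma foldl_add_prefix : ∀ (xs s : List String), ∃ t, xs.foldl PySem.Set.add s = s ++ t := by
  intro xs
  induction xs with
  | nil => intro s; exact ⟨[], by simp⟩
  | cons x xs ih =>
    intro s
    by_cases hm : x ∈ s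
    · have hadd : PySem.Set.add s x = s := by simp [PySem.Set.add, PySem.Set.contains, hm]
      simpa [hadd] using ih s
    · have hadd : PySem.Set.add s x = s ++ [x] := by
        simp [PySem.Set.add, PySem.Set.contains, hm]
      obtain ⟨t, ht⟩ := ih (s ++ [x])
      exact ⟨[x] ++ t, by simp [hadd, ht]⟩

lemma foldl_pvStep_dedup_aux : ∀ (xs s : List String) (d : PySem.Dict String Int),
    (∀ k ∈ s, d.contains k = true) →
    xs.foldl pvStep d = ((xs.foldl PySem.Set.add s).drop s.length).foldl pvStep d := by
  intro xs
  induction xs with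
  | nil => intro s d _; simp
  | cons x xs ih =>
    intro s d hs
    by_cases hm : x ∈ s
    · have hadd : PySem.Set.add s x = s := by simp [PySem.Set.add, PySem.Set.contains, hm]
      simp only [List.foldl_cons, pvStep_of_contains d x (hs x hm), hadd]
      exact ih s d hs
    · have hadd : PySem.Set.add s x = s ++ [x] := by
        simp [PySem.Set.add, PySem.Set.contains, hm]
      simp only [List.foldl_cons, hadd]
      have hinv : ∀ k ∈ s ++ [x], (pvStep d x).contains k = true := by
        intro k hk
        rcases List.mem_append.mp hk with h | h
        · exact contains_pvStep_mono d k x (hs k h)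
        · have hk2 : k = x := by simpa using h
          rw [hk2]; exact contains_pvStep_self d x
      obtain ⟨t, ht⟩ := foldl_add_prefix xs (s ++ [x])
      rw [ih (s ++ [x]) (pvStep d x) hinv, ht]
      have h1 : s ++ [x] ++ t = s ++ (x :: t) := by simp
      rw [h1]
      have h2 : List.drop (s ++ [x]).length (s ++ (x :: t)) = t := by
        have : s ++ (x :: t) = (s ++ [x]) ++ t := by simp
        rw [this, List.drop_left]
      have h3 : List.drop s.length (s ++ (x :: t)) = x :: t := List.drop_left
      rw [h2, h3]
      simp

lemma foldl_pvStep_dedup (xs : List String) (d : PySem.Dict String Int) :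
    xs.foldl pvStep d = (PySem.List.dedup xs).foldl pvStep d := by
  rw [PySem.List.dedup_eq_ofList, PySem.Set.ofList_eq_foldl]
  simpa using foldl_pvStep_dedup_aux xs [] d (by simp)

lemma foldl_pair_keys (g1 g2 : PySem.Dict String Int → String → PySem.Dict String Int)
    (k1 k2 : (String × String × String) → String) :
    ∀ (l : List (String × String × String)) (p : PySem.Dict String Int × PySem.Dict String Int),
    l.foldl (fun st t => (g1 st.1 (k1 t), g2 st.2 (k2 t))) p
      = ((l.map k1).foldl g1 p.1, (l.map k2).foldl g2 p.2) := by
  intro l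
  induction l with
  | nil => intro p; simp
  | cons a l ih => intro p; simp [ih]

lemma nested_eq_flat (sents : List (List (String × String × String)))
    (f : PySem.Dict String Int × PySem.Dict String Int → (String × String × String) →
         PySem.Dict String Int × PySem.Dict String Int)
    (p : PySem.Dict String Int × PySem.Dict String Int) :
    sents.foldl (fun st sent => sent.foldl f st) p
      = (sents.flatMap (fun sent => sent)).foldl f p := by
  rw [List.flatMap_def, List.map_id', List.foldl_flatten]

-- the crux: a pvStep-fold over a duplicate-free key list appends exactly the fresh
-- keys, each paired with its position (offset by the starting dict's size)
lemma foldl_pvStep_items : ∀ (xs : List String) (d : PySem.Dict String Int),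
    xs.Nodup → d.keys.Nodup →
    (xs.foldl pvStep d).items
      = d.items ++ (PySem.List.enumerate (xs.filter (fun k => !(d.contains k))) (d.size : Int)).map
          (fun p => (p.2, p.1)) := by
  intro xs
  induction xs with
  | nil => intro d _ _; simp [PySem.List.enumerate_nil]
  | cons x xs ih =>
    intro d hnd hkd
    obtain ⟨hx, hxs⟩ := List.nodup_cons.mp hnd
    by_cases hc : d.contains x = true
    · rw [List.foldl_cons, pvStep_of_contains d x hc]
      have hf : (x :: xs).filter (fun k => !(d.contains k)) = xs.filter (fun k => !(d.contains k)) := by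
        simp [hc]
      rw [hf]
      exact ih d hxs hkd
    · have hc' : d.contains x = false := by simpa using hc
      have hstep : pvStep d x = d.insert x (d.size : Int) := by
        simp [pvStep, PySem.Dict.setdefault_of_not_contains (h := hc')]
      rw [List.foldl_cons, hstep]
      have hitems : (d.insert x (d.size : Int)).items = d.items ++ [(x, (d.size : Int))] :=
        PySem.Dict.items_insert_of_not_contains _ _ (h := hc')
      have hsize : (d.insert x (d.size : Int)).size = d.size + 1 := by
        simp [PySem.Dict.size_insert, hc']
      have hkeys : (d.insert x (d.size : Int)).keys.Nodup := PySem.Dict.nodup_keys_insert d x _ hkd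
      have hfilter : xs.filter (fun k => !((d.insert x (d.size : Int)).contains k))
          = xs.filter (fun k => !(d.contains k)) := by
        apply List.filter_congr
        intro k hk
        have hne : k ≠ x := fun h => hx (h ▸ hk)
        simp [PySem.Dict.contains_insert, hne]
      rw [ih (d.insert x (d.size : Int)) hxs hkeys, hitems, hfilter, hsize]
      have hfc : (x :: xs).filter (fun k => !(d.contains k))
          = x :: xs.filter (fun k => !(d.contains k)) := by
        simp [hc']
      rw [hfc, PySem.List.enumerate_cons]
      push_cast
      simp


-- dict.update with fresh, distinct keys appends its pairs
lemma update_items_fresh (d : PySem.Dict String Int) (l : List (String × Int))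
    (hfresh : ∀ p ∈ l, d.contains p.1 = false) (hnd : (l.map Prod.fst).Nodup) :
    (d.update l).items = d.items ++ l := by
  have h := PySem.Dict.items_foldl_insert_fresh l Prod.fst Prod.snd d hfresh hnd
  simpa [PySem.Dict.update] using h

lemma containsW (k : String) :
    (PySem.Dict.ofList [("[PAD]", (0 : Int)), ("[UNK]", 1)]).contains k
      = (k == "[PAD]" || k == "[UNK]") := by
  have h : PySem.Dict.ofList [("[PAD]", (0 : Int)), ("[UNK]", 1)]
      = PySem.Dict.mk [("[PAD]", 0), ("[UNK]", 1)] := by rfl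
  by_cases h1 : k = "[PAD]"
  · subst h1; decide
  · by_cases h2 : k = "[UNK]"
    · subst h2; decide
    · have e1 : (("[PAD]" : String) == k) = false := beq_eq_false_iff_ne.mpr (Ne.symm h1)
      have e2 : (("[UNK]" : String) == k) = false := beq_eq_false_iff_ne.mpr (Ne.symm h2)
      have e3 : (k == "[PAD]") = false := beq_eq_false_iff_ne.mpr h1
      have e4 : (k == "[UNK]") = false := beq_eq_false_iff_ne.mpr h2
      simp [h, PySem.Dict.contains_mk, e1, e2, e3, e4]

lemma containsP (k : String) :
    (PySem.Dict.ofList [("[PAD]", (0 : Int))]).contains k = (k == "[PAD]") := by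
  have h : PySem.Dict.ofList [("[PAD]", (0 : Int))] = PySem.Dict.mk [("[PAD]", 0)] := by rfl
  simp [h, PySem.Dict.contains_mk, eq_comm]

lemma filterW (xs : List String) :
    xs.filter (fun k => !((PySem.Dict.ofList [("[PAD]", (0 : Int)), ("[UNK]", 1)]).contains k))
      = xs.filter (fun w => w != "[PAD]" && w != "[UNK]") := by
  apply List.filter_congr
  intro k _
  simp [containsW, bne]

lemma filterP (xs : List String) :
    xs.filter (fun k => !((PySem.Dict.ofList [("[PAD]", (0 : Int))]).contains k))
      = xs.filter (fun p => p != "[PAD]") := by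
  apply List.filter_congr
  intro k _
  simp [containsP, bne]

lemma freshW (xs : List String) :
    ∀ p ∈ (PySem.List.enumerate (xs.filter (fun w => w != "[PAD]" && w != "[UNK]")) 2).map
        (fun p => (p.2, p.1)),
      (PySem.Dict.ofList [("[PAD]", (0 : Int)), ("[UNK]", 1)]).contains p.1 = false := by
  intro p hp
  obtain ⟨q, hq, rfl⟩ := List.mem_map.mp hp
  have hmem : q.2 ∈ xs.filter (fun w => w != "[PAD]" && w != "[UNK]") := by
    have := PySem.List.map_snd_enumerate (xs.filter (fun w => w != "[PAD]" && w != "[UNK]")) 2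
    exact this ▸ List.mem_map_of_mem hq
  have := (List.mem_filter.mp hmem).2
  simp only [containsW]
  simp only [Bool.and_eq_true, bne_iff_ne, ne_eq] at this
  simp [this.1, this.2]

lemma freshP (xs : List String) :
    ∀ p ∈ (PySem.List.enumerate (xs.filter (fun p => p != "[PAD]")) 1).map (fun p => (p.2, p.1)),
      (PySem.Dict.ofList [("[PAD]", (0 : Int))]).contains p.1 = false := by
  intro p hp
  obtain ⟨q, hq, rfl⟩ := List.mem_map.mp hp
  have hmem : q.2 ∈ xs.filter (fun p => p != "[PAD]") := by
    have := PySem.List.map_snd_enumerate (xs.filter (fun p => p != "[PAD]")) 1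
    exact this ▸ List.mem_map_of_mem hq
  have := (List.mem_filter.mp hmem).2
  simp only [bne_iff_ne, ne_eq] at this
  simp [containsP, this]

lemma nodup_map_fst_swap_enumerate (xs : List String) (hnd : xs.Nodup) (s : Int) :
    (((PySem.List.enumerate xs s).map (fun p => (p.2, p.1))).map Prod.fst).Nodup := by
  have h : ((PySem.List.enumerate xs s).map (fun p => (p.2, p.1))).map Prod.fst = xs := by
    rw [List.map_map]
    exact PySem.List.map_snd_enumerate xs s
  rw [h]; exact hnd

lemma nodupW (xs : List String) :
    ((((PySem.List.enumerate ((PySem.List.dedup xs).filter (fun w => w != "[PAD]" && w != "[UNK]")) 2)).map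
        (fun p => (p.2, p.1))).map Prod.fst).Nodup :=
  nodup_map_fst_swap_enumerate _ ((PySem.List.nodup_dedup xs).filter _) 2

lemma nodupP (xs : List String) :
    ((((PySem.List.enumerate ((PySem.List.dedup xs).filter (fun p => p != "[PAD]")) 1)).map
        (fun p => (p.2, p.1))).map Prod.fst).Nodup :=
  nodup_map_fst_swap_enumerate _ ((PySem.List.nodup_dedup xs).filter _) 1

-- ===== VERDICT (by name: the statement is the Claim_ definition above) =====
theorem construct_word_vocab_dict_spec : Claim_equal_construct_word_vocab_dict := by
  intro sents _
  unfold Spec_construct_word_vocab_dict construct_word_vocab_dict construct_word_vocab_dict_alt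
  show _ = _
  rw [show (fun (st : PySem.Dict String Int × PySem.Dict String Int)
      (t : String × String × String) =>
      (PySem.Dict.setdefault st.1 t.1 (st.1.size : Int),
       PySem.Dict.setdefault st.2 t.2.1 (st.2.size : Int)))
    = (fun st t => (pvStep st.1 (t.1), pvStep st.2 (t.2.1))) from rfl]
  rw [nested_eq_flat sents, foldl_pair_keys pvStep pvStep (fun t => t.1) (fun t => t.2.1),
      foldl_pvStep_dedup (List.map (fun t => t.1) (List.flatMap (fun sent => sent) sents)),
      foldl_pvStep_dedup (List.map (fun t => t.2.1) (List.flatMap (fun sent => sent) sents))]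
  dsimp only
  rw [foldl_pvStep_items (PySem.List.dedup (List.map (fun t => t.1) (List.flatMap (fun sent => sent) sents))) _
        (PySem.List.nodup_dedup _) (by decide),
      foldl_pvStep_items (PySem.List.dedup (List.map (fun t => t.2.1) (List.flatMap (fun sent => sent) sents))) _
        (PySem.List.nodup_dedup _) (by decide),
      update_items_fresh _ _ (freshW _) (nodupW _),
      update_items_fresh _ _ (freshP _) (nodupP _)]
  simp only [filterW, filterP]
  rfl
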